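-- pv_equiv track=rewrite | github.com/facebookresearch/Evariste | formal/evariste/envs/hl/api.py | _hol_tokens_to_ocaml
-- ===== SOURCE A (Python) =====
-- from typing import List, Union, Optional, NewType, Tuple, Dict, Set
--
-- HOLLightToken = NewType("HOLLightToken", str)
--
-- class HOLLightException(Exception):
--     def __init__(
--         self, *args, logged: bool = False, origin: Optional[Exception] = None
--     ) -> None:
--         super().__init__(*args)
--         self.logged = logged
--         self.origin = origin
--
-- def _hol_tokens_to_ocaml(tokens: List[HOLLightToken]) -> str:
--     ocaml_str = ""
--     is_number = False
--     for tok in tokens: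
--         if tok == "<NUMBER>":
--             if is_number:
--                 raise HOLLightException(f"Wrong number tokenization: {tokens}")
--             is_number = True
--             continue
--         if tok == "</NUMBER>":
--             if not is_number:
--                 raise HOLLightException(f"Wrong number tokenization: {tokens}")
--             is_number = False
--             ocaml_str += " "
--             continue
--         ocaml_str += tok + ("" if is_number else " ")
--     if is_number:
--         raise HOLLightException(f"Wrong number tokenization: {tokens}")
--     return ocaml_str.strip()
-- ===== SOURCE B (Python) =====
-- class HOLLightException(Exception):
--     def __init__(self, *args, logged=False, origin=None):
--         super().__init__(*args)
--         self.logged = logged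
--         self.origin = origin
--
--
-- def _hol_tokens_to_ocaml(tokens):
--     # Block-slicing: repeatedly locate the next <NUMBER>...</NUMBER> block by index(),
--     # copy the plain tokens before it, fuse the block into one word, recurse on the rest.
--     words = []
--     rest = tokens
--     while True:
--         i = rest.index("<NUMBER>") if "<NUMBER>" in rest else None
--         j = rest.index("</NUMBER>") if "</NUMBER>" in rest else None
--         if i is None:
--             if j is not None:
--                 raise HOLLightException(f"Wrong number tokenization: {tokens}")
--             words.extend(rest)
--             break
--         if j is None or j < i:
--             raise HOLLightException(f"Wrong number tokenization: {tokens}")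
--         block = rest[i + 1 : j]
--         if "<NUMBER>" in block:
--             raise HOLLightException(f"Wrong number tokenization: {tokens}")
--         words.extend(rest[:i])
--         words.append("".join(block))
--         rest = rest[j + 1 :]
--     return " ".join(words).strip()
-- ===== Notes on version B (the rewrite author's own statement) =====
-- stated objective: alternative
-- what changed: B replaces A's token-by-token flag machine with block slicing: it repeatedly locates the next <NUMBER>...</NUMBER> pair with index(), copies the plain tokens before it, fuses the sliced block into one word, recurses on the remainder, and joins the words once at the end.
import Mathlib
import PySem

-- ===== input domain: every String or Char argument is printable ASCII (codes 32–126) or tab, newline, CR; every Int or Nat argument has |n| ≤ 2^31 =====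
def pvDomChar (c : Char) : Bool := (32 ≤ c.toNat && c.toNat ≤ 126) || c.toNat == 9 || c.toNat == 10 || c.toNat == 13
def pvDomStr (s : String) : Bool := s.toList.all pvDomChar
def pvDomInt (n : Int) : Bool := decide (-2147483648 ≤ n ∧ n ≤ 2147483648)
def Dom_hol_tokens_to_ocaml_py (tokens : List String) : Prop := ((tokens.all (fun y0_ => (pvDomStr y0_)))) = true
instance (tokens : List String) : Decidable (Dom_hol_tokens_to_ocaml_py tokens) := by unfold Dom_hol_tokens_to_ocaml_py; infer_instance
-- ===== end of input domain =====

-- B replaces A's token-by-token flag machine by block slicing: it repeatedly locates the next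
-- <NUMBER>…</NUMBER> block with index(), copies the plain tokens before it, fuses the block into
-- one word, and recurses on the remainder; the words are joined once at the end ('alternative').
-- Strings are handled as List Char (PySem.Chars); 'none' marks exactly where the Python raises
-- HOLLightException.

-- ===== PORT A =====
-- literal port of A's loop: state = (ocaml_str, is_number); none = HOLLightException
def holA_loop (ts : List String) (s : List Char) (isNum : Bool) : Option (List Char) :=
  match ts with
  | [] => if isNum then none else some (PySem.Chars.strip s)
  | t :: ts' =>
    if t = "<NUMBER>" then
      if isNum then none else holA_loop ts' s true
    else if t = "</NUMBER>" then
      if isNum then holA_loop ts' (s ++ [' ']) false else none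
    else
      holA_loop ts' (s ++ t.toList ++ (if isNum then [] else [' '])) isNum

def hol_tokens_to_ocaml_py (tokens : List String) : String :=
  String.ofList ((holA_loop tokens [] false).getD [])

-- ===== PORT B =====
-- literal port of B's while loop: state = (rest, words); in Source B the pair
-- '"x" in rest'/'rest.index("x")' is PySem.List.index?; none = HOLLightException
def holB_loop (rest : List String) (words : List (List Char)) : Option (List (List Char)) :=
  match hi : PySem.List.index? rest "<NUMBER>", hj : PySem.List.index? rest "</NUMBER>" with
  | none, none => some (words ++ rest.map String.toList)
  | none, some _ => none
  | some _, none => none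
  | some i, some j =>
    if j < i then none
    else
      let block := PySem.List.slice rest (some ((i + 1 : Nat) : Int)) (some ((j : Nat) : Int))
      if "<NUMBER>" ∈ block then none
      else
        holB_loop (PySem.List.slice rest (some ((j + 1 : Nat) : Int)) none)
          (words ++ (PySem.List.slice rest none (some ((i : Nat) : Int))).map String.toList
            ++ [PySem.Chars.join [] (block.map String.toList)])
termination_by rest.length
decreasing_by
  have hm : "</NUMBER>" ∈ rest := (PySem.List.index?_isSome_iff rest "</NUMBER>").mp (by rw [hj]; rfl)
  have hlen : 0 < rest.length := List.length_pos_of_mem hm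
  rw [PySem.List.slice_from_natCast]
  simp only [List.length_drop]
  omega

def hol_tokens_to_ocaml_py_alt (tokens : List String) : String :=
  String.ofList
    (((holB_loop tokens []).map
        (fun ws => PySem.Chars.strip (PySem.Chars.join [' '] ws))).getD [])

-- ===== PRECONDITION & SPEC =====
-- Pre_ excludes exactly the inputs on which A raises HOLLightException: the subsequence of
-- number markers must alternate <NUMBER>, </NUMBER>, … starting with an open and ending closed.
def Pre_hol_tokens_to_ocaml_py (tokens : List String) : Prop :=
  let ms := tokens.filter (fun t => t == "<NUMBER>" || t == "</NUMBER>")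
  ms = (List.range ms.length).map (fun i => if i % 2 = 0 then "<NUMBER>" else "</NUMBER>") ∧
    ms.length % 2 = 0
instance (tokens : List String) : Decidable (Pre_hol_tokens_to_ocaml_py tokens) := by
  unfold Pre_hol_tokens_to_ocaml_py; infer_instance

def pvWitness_hol_tokens_to_ocaml_py : List String :=
  ["a", "<NUMBER>", "1", "2", "</NUMBER>", "b"]

def Spec_hol_tokens_to_ocaml_py (tokens : List String) (out : String) : Prop :=
  out = hol_tokens_to_ocaml_py_alt tokens
instance (tokens : List String) (out : String) : Decidable (Spec_hol_tokens_to_ocaml_py tokens out) := by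
  unfold Spec_hol_tokens_to_ocaml_py; infer_instance

-- ===== CLAIM (what is proved, stated in full; the proofs are below) =====
def Claim_equal_hol_tokens_to_ocaml_py : Prop :=
  ∀ (tokens : List String), Dom_hol_tokens_to_ocaml_py tokens →
    Pre_hol_tokens_to_ocaml_py tokens →
    Spec_hol_tokens_to_ocaml_py tokens (hol_tokens_to_ocaml_py tokens)

-- ===== LEMMAS AND PROOFS =====

-- Proof-side intermediate: A's flag machine accumulating a WORD LIST instead of a string.
def holW (ts : List String) (ws : List (List Char)) (cur : List Char) (inNum : Bool) :
    Option (List (List Char)) :=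
  match ts with
  | [] => if inNum then none else some ws
  | t :: ts' =>
    if t = "<NUMBER>" then
      if inNum then none else holW ts' ws [] true
    else if t = "</NUMBER>" then
      if inNum then holW ts' (ws ++ [cur]) cur false else none
    else if inNum then
      holW ts' ws (cur ++ t.toList) true
    else
      holW ts' (ws ++ [t.toList]) cur false

-- A's accumulated string after flushing the words ws: every word followed by one space.
def pvTrail (ws : List (List Char)) : List Char := (ws.map (fun w => w ++ [' '])).flatten

lemma pvTrail_append (ws : List (List Char)) (w : List Char) :
    pvTrail (ws ++ [w]) = pvTrail ws ++ w ++ [' '] := by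
  simp [pvTrail]

lemma rstrip_append_space (x : List Char) :
    PySem.Chars.rstrip (x ++ [' ']) = PySem.Chars.rstrip x := by
  simp [PySem.Chars.rstrip, PySem.Chars.isspace]

lemma strip_append_space (x : List Char) :
    PySem.Chars.strip (x ++ [' ']) = PySem.Chars.strip x := by
  unfold PySem.Chars.strip PySem.Chars.lstrip
  rw [List.dropWhile_append]
  split
  · next h =>
    rw [List.isEmpty_iff] at h
    rw [h]
    simp [List.dropWhile, PySem.Chars.isspace]
  · exact rstrip_append_space _

lemma pvTrail_eq_join (ws : List (List Char)) (h : ws ≠ []) :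
    pvTrail ws = PySem.Chars.join [' '] ws ++ [' '] := by
  induction ws with
  | nil => simp at h
  | cons w ws ih =>
    cases ws with
    | nil => simp [pvTrail, PySem.Chars.join, List.intercalate]
    | cons w' ws' =>
      simp only [pvTrail, List.map_cons, List.flatten_cons] at *
      rw [ih (by simp)]
      simp [PySem.Chars.join, List.intercalate, List.intersperse]

lemma strip_pvTrail (ws : List (List Char)) :
    PySem.Chars.strip (pvTrail ws) = PySem.Chars.strip (PySem.Chars.join [' '] ws) := by
  cases ws with
  | nil => simp [pvTrail, PySem.Chars.join, List.intercalate]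
  | cons w ws =>
    rw [pvTrail_eq_join _ (by simp)]
    exact strip_append_space _

-- A's string loop computes strip ∘ join of the word list holW computes.
lemma holW_eq_holA (ts : List String) :
    ∀ (ws : List (List Char)) (cur : List Char) (inNum : Bool),
      holA_loop ts (pvTrail ws ++ (if inNum then cur else [])) inNum =
        (holW ts ws cur inNum).map
          (fun ws => PySem.Chars.strip (PySem.Chars.join [' '] ws)) := by
  induction ts with
  | nil =>
    intro ws cur inNum
    cases inNum with
    | false => simp [holA_loop, holW, strip_pvTrail]
    | true => simp [holA_loop, holW]
  | cons t ts ih =>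
    intro ws cur inNum
    by_cases h1 : t = "<NUMBER>"
    · cases inNum with
      | true => simp [holA_loop, holW, h1]
      | false =>
        have h := ih ws [] true
        simp only [if_pos, List.append_nil] at h
        simp [holA_loop, holW, h1, h]
    · by_cases h2 : t = "</NUMBER>"
      · cases inNum with
        | false => simp [holA_loop, holW, h2]
        | true =>
          simp only [holA_loop, holW, if_neg h1, if_pos h2, if_pos, ← ih, pvTrail_append]
          simp
      · cases inNum with
        | true =>
          simp only [holA_loop, holW, if_neg h1, if_neg h2, if_pos, ← ih]
          simp
        | false =>
          have h := ih (ws ++ [t.toList]) cur false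
          simp only [if_neg (Bool.false_ne_true), List.append_nil, pvTrail_append] at h
          simp only [holA_loop, holW, if_neg h1, if_neg h2, if_neg (Bool.false_ne_true)]
          rw [← h]
          simp

-- holW over a marker-free prefix in plain mode: each token becomes a word.
lemma holW_plain (pre : List String) (hN : "<NUMBER>" ∉ pre) (hC : "</NUMBER>" ∉ pre) :
    ∀ (ts : List String) (ws : List (List Char)) (cur : List Char),
      holW (pre ++ ts) ws cur false = holW ts (ws ++ pre.map String.toList) cur false := by
  induction pre with
  | nil => intro ts ws cur; simp [holW]
  | cons p pre ih =>
    intro ts ws cur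
    have h1 : p ≠ "<NUMBER>" := fun h => hN (by simp [h])
    have h2 : p ≠ "</NUMBER>" := fun h => hC (by simp [h])
    simp only [List.cons_append, holW, if_neg h1, if_neg h2, if_neg (Bool.false_ne_true)]
    rw [ih (fun h => hN (List.mem_cons_of_mem _ h)) (fun h => hC (List.mem_cons_of_mem _ h))]
    simp

-- holW over a marker-free block in number mode: the block is appended to the buffer.
lemma holW_block (blk : List String) (hN : "<NUMBER>" ∉ blk) (hC : "</NUMBER>" ∉ blk) :
    ∀ (ts : List String) (ws : List (List Char)) (cur : List Char),
      holW (blk ++ ts) ws cur true =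
        holW ts ws (cur ++ PySem.Chars.join [] (blk.map String.toList)) true := by
  induction blk with
  | nil => intro ts ws cur; simp [PySem.Chars.join, List.intercalate]
  | cons b blk ih =>
    intro ts ws cur
    have h1 : b ≠ "<NUMBER>" := fun h => hN (by simp [h])
    have h2 : b ≠ "</NUMBER>" := fun h => hC (by simp [h])
    simp only [List.cons_append, holW, if_neg h1, if_neg h2, if_pos rfl]
    rw [ih (fun h => hN (List.mem_cons_of_mem _ h)) (fun h => hC (List.mem_cons_of_mem _ h))]
    simp [PySem.Chars.join, List.intercalate]
    cases blk with
    | nil => simp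
    | cons b' blk' => simp

-- holW raises on a stray close: no open before the first close in plain mode.
lemma holW_stray_close (pre : List String) (hN : "<NUMBER>" ∉ pre) (hC : "</NUMBER>" ∈ pre) :
    ∀ (ts : List String) (ws : List (List Char)) (cur : List Char),
      holW (pre ++ ts) ws cur false = none := by
  induction pre with
  | nil => simp at hC
  | cons p pre ih =>
    intro ts ws cur
    have h1 : p ≠ "<NUMBER>" := fun h => hN (by simp [h])
    by_cases h2 : p = "</NUMBER>"
    · simp [holW, h2]
    · have hC' : "</NUMBER>" ∈ pre := by
        rcases List.mem_cons.mp hC with h | h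
        · exact absurd h.symm h2
        · exact h
      simp only [List.cons_append, holW, if_neg h1, if_neg h2, if_neg (Bool.false_ne_true)]
      exact ih (fun h => hN (List.mem_cons_of_mem _ h)) hC' _ _ _

-- holW raises on a nested open: an open before the first close in number mode.
lemma holW_nested_open (blk : List String) (hN : "<NUMBER>" ∈ blk) (hC : "</NUMBER>" ∉ blk) :
    ∀ (ts : List String) (ws : List (List Char)) (cur : List Char),
      holW (blk ++ ts) ws cur true = none := by
  induction blk with
  | nil => simp at hN
  | cons b blk ih =>
    intro ts ws cur
    have h2 : b ≠ "</NUMBER>" := fun h => hC (by simp [h])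
    by_cases h1 : b = "<NUMBER>"
    · simp [holW, h1]
    · have hN' : "<NUMBER>" ∈ blk := by
        rcases List.mem_cons.mp hN with h | h
        · exact absurd h.symm h1
        · exact h
      simp only [List.cons_append, holW, if_neg h1, if_neg h2]
      exact ih hN' (fun h => hC (List.mem_cons_of_mem _ h)) _ _ _

-- holW raises when the stream ends (or a nested open appears) with a number still open.
lemma holW_unclosed (ts : List String) (hC : "</NUMBER>" ∉ ts) :
    ∀ (ws : List (List Char)) (cur : List Char), holW ts ws cur true = none := by
  induction ts with
  | nil => intro ws cur; simp [holW]
  | cons t ts ih =>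
    intro ws cur
    have h2 : t ≠ "</NUMBER>" := fun h => hC (by simp [h])
    by_cases h1 : t = "<NUMBER>"
    · simp [holW, h1]
    · simp only [holW, if_neg h1, if_neg h2]
      exact ih (fun h => hC (List.mem_cons_of_mem _ h)) _ _

-- one step of holW at each marker
lemma holW_open (ts : List String) (ws : List (List Char)) (cur : List Char) :
    holW ("<NUMBER>" :: ts) ws cur false = holW ts ws [] true := by
  simp [holW]

lemma holW_close (ts : List String) (ws : List (List Char)) (cur : List Char) :
    holW ("</NUMBER>" :: ts) ws cur true = holW ts (ws ++ [cur]) cur false := by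
  simp [holW]

-- Main: block slicing computes exactly what A's flag machine computes, as word lists.
lemma holB_eq_holW_aux : ∀ (n : Nat) (rest : List String), rest.length ≤ n →
    ∀ (ws : List (List Char)) (cur : List Char),
      holB_loop rest ws = holW rest ws cur false := by
  intro n
  induction n with
  | zero =>
    intro rest hlen ws cur
    have h0 : rest = [] := List.eq_nil_of_length_eq_zero (Nat.le_zero.mp hlen)
    subst h0
    simp [holB_loop, holW]
  | succ m ih =>
    intro rest hlen ws cur
    rw [holB_loop]
    split
    · -- no markers at all: every token becomes a word
      rename_i hN hC
      have hNm : "<NUMBER>" ∉ rest := (PySem.List.index?_eq_none_iff rest "<NUMBER>").mp hN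
      have hCm : "</NUMBER>" ∉ rest := (PySem.List.index?_eq_none_iff rest "</NUMBER>").mp hC
      have h := holW_plain rest hNm hCm [] ws cur
      simp only [List.append_nil] at h
      rw [h]
      simp [holW]
    · -- a close with no open: both raise
      rename_i j hN hC
      have hNm : "<NUMBER>" ∉ rest := (PySem.List.index?_eq_none_iff rest "<NUMBER>").mp hN
      have hCm : "</NUMBER>" ∈ rest :=
        (PySem.List.index?_isSome_iff rest "</NUMBER>").mp (by rw [hC]; rfl)
      have h := holW_stray_close rest hNm hCm [] ws cur
      simp only [List.append_nil] at h
      rw [h]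
    · -- an open never closed: both raise
      rename_i i hN hC
      obtain ⟨pre, suf, hdec, hplen, hNpre⟩ :=
        (PySem.List.index?_eq_some_iff rest "<NUMBER>" i).mp hN
      subst hdec
      have hCm : "</NUMBER>" ∉ pre ++ "<NUMBER>" :: suf :=
        (PySem.List.index?_eq_none_iff _ "</NUMBER>").mp hC
      have hCpre : "</NUMBER>" ∉ pre := fun h => hCm (List.mem_append_left _ h)
      have hCsuf : "</NUMBER>" ∉ suf := fun h =>
        hCm (List.mem_append_right _ (List.mem_cons_of_mem _ h))
      rw [holW_plain pre hNpre hCpre, holW_open, holW_unclosed suf hCsuf]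
    · -- an open and a close
      rename_i i j hN hC
      obtain ⟨pre, suf, hdec, hplen, hNpre⟩ :=
        (PySem.List.index?_eq_some_iff rest "<NUMBER>" i).mp hN
      subst hdec
      obtain ⟨pre2, suf2, hdec2, hplen2, hCpre2⟩ :=
        (PySem.List.index?_eq_some_iff _ "</NUMBER>" j).mp hC
      by_cases hji : j < i
      · -- the close comes first: both raise
        have hCpre : "</NUMBER>" ∈ pre := by
          have hp1 : pre2 ++ ["</NUMBER>"] <+: pre ++ "<NUMBER>" :: suf :=
            ⟨suf2, by simp [hdec2]⟩
          have hp2 : pre <+: pre ++ "<NUMBER>" :: suf := ⟨_, rfl⟩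
          have hp3 : pre2 ++ ["</NUMBER>"] <+: pre :=
            List.prefix_of_prefix_length_le hp1 hp2 (by simp [hplen2]; omega)
          exact hp3.subset (by simp)
        rw [if_pos hji, holW_stray_close pre hNpre hCpre]
      · -- i ≠ j since the two markers differ
        have hij : i < j := by
          rcases Nat.lt_or_ge i j with h | h
          · exact h
          · exfalso
            have hij' : j = i := Nat.le_antisymm h (Nat.not_lt.mp hji)
            subst hij'
            obtain ⟨h1, h2⟩ := List.append_inj hdec2 (by omega)
            simp at h2
        rw [if_neg hji]
        -- decompose: pre2 = pre ++ "<NUMBER>" :: t and suf = t ++ "</NUMBER>" :: suf2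
        have hpre1 : pre ++ ["<NUMBER>"] = pre2.take (i + 1) := by
          have h := congrArg (List.take (i + 1)) hdec2
          rw [show pre ++ "<NUMBER>" :: suf = (pre ++ ["<NUMBER>"]) ++ suf by simp] at h
          rw [List.take_left' (by simp [hplen])] at h
          rw [List.take_append_of_le_length (by omega)] at h
          exact h
        have hsuf : suf = pre2.drop (i + 1) ++ "</NUMBER>" :: suf2 := by
          have h := congrArg (List.drop (i + 1)) hdec2
          rw [show pre ++ "<NUMBER>" :: suf = (pre ++ ["<NUMBER>"]) ++ suf by simp] at h
          rw [List.drop_left' (by simp [hplen])] at h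
          rw [List.drop_append_of_le_length (by omega)] at h
          exact h
        set t := pre2.drop (i + 1) with ht
        have htlen : t.length = j - (i + 1) := by
          rw [ht, List.length_drop, hplen2]
        have hpre2 : pre2 = (pre ++ ["<NUMBER>"]) ++ t := by
          conv_lhs => rw [← List.take_append_drop (i + 1) pre2]
          rw [← hpre1, ht]
        have hCt : "</NUMBER>" ∉ t := fun h => hCpre2 (List.mem_of_mem_drop (ht ▸ h))
        have hCpre : "</NUMBER>" ∉ pre := fun h =>
          hCpre2 (hpre2 ▸ List.mem_append_left _ (List.mem_append_left _ h))
        -- the three slices of Source B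
        have hblock :
            PySem.List.slice (pre ++ "<NUMBER>" :: suf)
              (some ((i + 1 : Nat) : Int)) (some ((j : Nat) : Int)) = t := by
          rw [PySem.List.slice_natCast]
          rw [show pre ++ "<NUMBER>" :: suf = (pre ++ ["<NUMBER>"]) ++ suf by simp]
          rw [List.drop_left' (by simp [hplen])]
          rw [hsuf, List.take_left' (by omega)]
        have htake :
            PySem.List.slice (pre ++ "<NUMBER>" :: suf) none (some ((i : Nat) : Int)) = pre := by
          rw [PySem.List.slice_to_natCast,
            List.take_append_of_le_length (by omega), List.take_of_length_le (by omega)]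
        have hdrop :
            PySem.List.slice (pre ++ "<NUMBER>" :: suf) (some ((j + 1 : Nat) : Int)) none
              = suf2 := by
          rw [PySem.List.slice_from_natCast, hdec2]
          rw [show pre2 ++ "</NUMBER>" :: suf2 = (pre2 ++ ["</NUMBER>"]) ++ suf2 by simp]
          rw [List.drop_left' (by simp [hplen2])]
        simp only [hblock, htake, hdrop]
        -- unfold holW along the decomposition
        rw [hsuf, holW_plain pre hNpre hCpre, holW_open]
        by_cases hNt : "<NUMBER>" ∈ t
        · rw [if_pos hNt, holW_nested_open t hNt hCt]
        · rw [if_neg hNt, holW_block t hNt hCt, holW_close, List.nil_append]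
          have hlen2 : suf2.length ≤ m := by
            have h := congrArg List.length hdec2
            simp at h hlen
            omega
          rw [ih suf2 hlen2 _ (PySem.Chars.join [] (t.map String.toList))]

lemma holB_eq_holW (rest : List String) (ws : List (List Char)) (cur : List Char) :
    holB_loop rest ws = holW rest ws cur false :=
  holB_eq_holW_aux rest.length rest (Nat.le_refl _) ws cur

-- ===== VERDICT (by name: the statement is the Claim_ definition above) =====
theorem hol_tokens_to_ocaml_py_spec : Claim_equal_hol_tokens_to_ocaml_py := by
  intro tokens _ _
  unfold Spec_hol_tokens_to_ocaml_py hol_tokens_to_ocaml_py hol_tokens_to_ocaml_py_alt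
  rw [holB_eq_holW tokens [] []]
  rw [← holW_eq_holA]
  simp [pvTrail]
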